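-- pv_equiv track=rewrite | github.com/DLatreyte/hugo-site-source | content/premieres-nsi/chap-01/1ère Spé NSI/Chap. 6 - Les boucles/chap-06.py | triple_du_precedent
-- ===== SOURCE A (Python) =====
-- def triple_du_precedent(a: int) -> str:
--     """
--     Retourne une chaîne de caractères formée par une suite de 12
--     entiers dont chaque terme est égal au triple du précédent,
--     à partir du premier entier a, positif,  passé en argument.
--
--     >>> triple_du_precedent(1)
--     '1 3 9 27 81 243 729 2187 6561 19683 59049 177147 '
--     >>> triple_du_precedent(5)
--     '5 15 45 135 405 1215 3645 10935 32805 98415 295245 885735 '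
--     """
--     reponse = ""    # Initialisation de la chaîne à retourner
--     compteur = 1    # Initialisation du compteur
--     val_max_compteur = 12   # Valeur maximale pour le compteur
--
--     while compteur <= val_max_compteur:
--         reponse += str(a) + " "  # reponse += "{} ".format(a)
--         a *= 3
--         compteur += 1
--     return reponse
-- ===== SOURCE B (Python) =====
-- def triple_du_precedent(a: int) -> str:
--     """Closed-form: term i is a * 3**i; join 12 such terms, each with a trailing space."""
--     return "".join(str(a * 3 ** i) + " " for i in range(12))
-- ===== Notes on version B (the rewrite author's own statement) =====
-- stated objective: idiomatic
-- what changed: Replaces the while-loop with a mutated running value and counter by a join over a range of twelve indices, computing each term independently in closed form as the start value times three to the power of the index.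
import Mathlib
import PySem

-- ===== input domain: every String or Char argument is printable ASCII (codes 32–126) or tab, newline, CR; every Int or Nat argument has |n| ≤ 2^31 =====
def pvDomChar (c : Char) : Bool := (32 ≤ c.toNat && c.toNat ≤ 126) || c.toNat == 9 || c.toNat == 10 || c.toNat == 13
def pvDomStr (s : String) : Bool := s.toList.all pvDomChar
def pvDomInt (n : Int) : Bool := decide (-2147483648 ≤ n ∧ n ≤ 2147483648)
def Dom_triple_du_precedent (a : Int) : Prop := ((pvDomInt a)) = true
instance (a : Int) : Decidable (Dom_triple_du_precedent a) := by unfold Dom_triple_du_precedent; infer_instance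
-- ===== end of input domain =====

-- B replaces A's while-loop (mutated running value + counter) by an idiomatic join over
-- range(12) with each term computed independently in closed form as a * 3**i.


-- ===== PORT A =====
-- the while loop: state (a, compteur, reponse), runs while compteur ≤ 12
def tripLoop (a : Int) (compteur : Int) (reponse : String) : String :=
  if compteur ≤ 12 then
    tripLoop (a * 3) (compteur + 1) (reponse ++ PySem.Int.toStr a ++ " ")
  else reponse
termination_by (13 - compteur).toNat
decreasing_by omega

def triple_du_precedent (a : Int) : String :=
  tripLoop a 1 ""

-- ===== PORT B =====
def triple_du_precedent_alt (a : Int) : String :=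
  PySem.Str.join ""
    ((PySem.List.pyRange 0 12 1).map (fun i => PySem.Int.toStr (a * 3 ^ i.toNat) ++ " "))

-- ===== PRECONDITION & SPEC =====
def Spec_triple_du_precedent (a : Int) (out : String) : Prop := out = triple_du_precedent_alt a
instance (a : Int) (out : String) : Decidable (Spec_triple_du_precedent a out) := by unfold Spec_triple_du_precedent; infer_instance

-- ===== CLAIM (what is proved, stated in full; the proofs are below) =====
def Claim_equal_triple_du_precedent : Prop := ∀ (a : Int), Dom_triple_du_precedent a → Spec_triple_du_precedent a (triple_du_precedent a)

-- ===== LEMMAS AND PROOFS =====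
theorem trip_eq (a : Int) :
    triple_du_precedent a = triple_du_precedent_alt a := by
  unfold triple_du_precedent triple_du_precedent_alt
  rw [tripLoop, tripLoop, tripLoop, tripLoop, tripLoop, tripLoop, tripLoop, tripLoop,
      tripLoop, tripLoop, tripLoop, tripLoop, tripLoop]
  rw [String.ext_iff]
  norm_num [PySem.List.pyRange, PySem.Str.join, List.range_succ, Function.comp,
    PySem.Chars.join, String.toList_append, String.toList_ofList, show (12:Int).toNat = 12 from rfl,
    List.intercalate, List.intersperse, List.map, List.range_succ]
  norm_num [show ((2:Int)).toNat = 2 from rfl, show ((3:Int)).toNat = 3 from rfl, show ((4:Int)).toNat = 4 from rfl, show ((5:Int)).toNat = 5 from rfl, show ((6:Int)).toNat = 6 from rfl, show ((7:Int)).toNat = 7 from rfl, show ((8:Int)).toNat = 8 from rfl, show ((9:Int)).toNat = 9 from rfl, show ((10:Int)).toNat = 10 from rfl, show ((11:Int)).toNat = 11 from rfl]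
  ring_nf

-- ===== VERDICT (by name: the statement is the Claim_ definition above) =====
theorem triple_du_precedent_spec : Claim_equal_triple_du_precedent := by
  intro a _
  exact trip_eq a
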